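-- pv_equiv track=rewrite | github.com/AhmedRomuo/Transpostion | Transpostion_task2.py | key_assign
-- ===== SOURCE A (Python) =====
-- ls = ['a', 'b', 'c', 'd', 'e', 'f', 'g', 'h', 'i', 'j', 'k', 'l', 'm', 'n', 'o', 'p', 'q', 'r', 's', 't', 'u', 'v', 'w',
--       'x', 'y', 'z']
--
-- def key_assign(key):
--     init = 0
--     ls_key_sort = [None] * len(key)
--
--     for i in range(len(ls)):
--         k = 0
--         while k < len(key):
--             if ls[i] == key[k]:
--                 init += 1
--                 ls_key_sort[k] = init
--             k += 1
--         i += 1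
--     return ls_key_sort
-- ===== SOURCE B (Python) =====
-- def key_assign(key):
--     n = len(key)
--     out = []
--     for k in range(n):
--         c = key[k]
--         if 'a' <= c <= 'z':
--             r = 0
--             for j in range(n):
--                 d = key[j]
--                 if 'a' <= d <= 'z' and (d < c or (d == c and j < k)):
--                     r += 1
--             out.append(r + 1)
--         else:
--             out.append(None)
--     return out
-- ===== Notes on version B (the rewrite author's own statement) =====
-- stated objective: alternative
-- what changed: B replaces A's 26 alphabet passes with a shared mutable counter by a direct per-position rank computation: each lowercase position's value is 1 + the number of positions that precede it in (letter, index) lexicographic order; non-letters stay None.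
import Mathlib
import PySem

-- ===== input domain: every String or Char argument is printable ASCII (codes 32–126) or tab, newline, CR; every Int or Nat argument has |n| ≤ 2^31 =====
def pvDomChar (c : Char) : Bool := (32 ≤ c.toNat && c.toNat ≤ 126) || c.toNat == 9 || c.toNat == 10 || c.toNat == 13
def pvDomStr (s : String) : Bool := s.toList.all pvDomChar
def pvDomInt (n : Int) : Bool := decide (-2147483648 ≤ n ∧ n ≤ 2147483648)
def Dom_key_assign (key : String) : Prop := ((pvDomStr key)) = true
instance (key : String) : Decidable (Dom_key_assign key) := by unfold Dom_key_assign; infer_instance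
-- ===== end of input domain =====

-- B replaces A's 26 alphabet passes with a shared counter by a direct per-position rank count
-- (1 + number of positions lexicographically earlier by (letter, index)); an alternative decomposition, not faster.

-- ===== PORT A =====
def lsA : List Char :=
  ['a','b','c','d','e','f','g','h','i','j','k','l','m',
   'n','o','p','q','r','s','t','u','v','w','x','y','z']

-- body of A's inner `while k < len(key)` loop
def stepA (cs : List Char) (c : Char) (st : Int × List (Option Int)) (k : Nat) :
    Int × List (Option Int) :=
  if c == cs.getD k ' ' then (st.1 + 1, st.2.set k (some (st.1 + 1))) else st

def key_assign (key : String) : List (Option Int) :=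
  let cs := key.toList
  (lsA.foldl (fun st c => (List.range cs.length).foldl (stepA cs c) st)
    ((0 : Int), List.replicate cs.length (none : Option Int))).2

-- ===== PORT B =====
def isLow (d : Char) : Bool := decide ('a' ≤ d) && decide (d ≤ 'z')

-- B's inner counting loop: how many positions precede k in (letter, index) order
def lowRank (cs : List Char) (k : Nat) : Nat :=
  (List.range cs.length).countP (fun j =>
    isLow (cs.getD j ' ') &&
      (decide (cs.getD j ' ' < cs.getD k ' ') ||
        (cs.getD j ' ' == cs.getD k ' ' && decide (j < k))))

def key_assign_alt (key : String) : List (Option Int) :=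
  let cs := key.toList
  (List.range cs.length).map (fun k =>
    if isLow (cs.getD k ' ') then some ((lowRank cs k : Int) + 1) else none)

-- ===== PRECONDITION & SPEC =====
def Spec_key_assign (key : String) (out : List (Option Int)) : Prop := out = key_assign_alt key
instance (key : String) (out : List (Option Int)) : Decidable (Spec_key_assign key out) := by unfold Spec_key_assign; infer_instance

-- ===== CLAIM (what is proved, stated in full; the proofs are below) =====
def Claim_equal_key_assign : Prop := ∀ (key : String), Dom_key_assign key → Spec_key_assign key (key_assign key)

-- ===== LEMMAS AND PROOFS =====

-- chars d with d ∈ {'a', …} among the first m letters of the alphabet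
def inL (m : Nat) (d : Char) : Bool := 97 ≤ d.toNat && d.toNat < 97 + m

theorem char_eq_iff_toNat (d c : Char) : d = c ↔ d.toNat = c.toNat := by
  constructor
  · intro h; rw [h]
  · intro h; exact Char.ext (UInt32.toNat_inj.mp h)

theorem char_lt_iff_toNat (d c : Char) : d < c ↔ d.toNat < c.toNat := by
  rw [Char.lt_def, UInt32.lt_iff_toNat_lt]; rfl

theorem char_le_iff_toNat (d c : Char) : d ≤ c ↔ d.toNat ≤ c.toNat := by
  rw [Char.le_def, UInt32.le_iff_toNat_le]; rfl

theorem lsA_getD_toNat : ∀ m, m < 26 → (lsA.getD m ' ').toNat = 97 + m := by decide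

-- countP of a disjoint disjunction splits
theorem countP_or_disj {α : Type} (p q : α → Bool) (l : List α)
    (h : ∀ x ∈ l, ¬(p x = true ∧ q x = true)) :
    l.countP (fun x => p x || q x) = l.countP p + l.countP q := by
  induction l with
  | nil => simp
  | cons a t ih =>
    have ht : ∀ x ∈ t, ¬(p x = true ∧ q x = true) := fun x hx => h x (List.mem_cons_of_mem a hx)
    by_cases hp : p a = true <;> by_cases hq : q a = true
    · exact absurd ⟨hp, hq⟩ (h a (List.mem_cons_self))
    · simp [hp, hq, ih ht]; omega
    · simp [hp, hq, ih ht]; omega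
    · simp [hp, hq, ih ht]

-- counting "q j and j < k" over range n is counting q over range k
theorem countP_range_lt (q : Nat → Bool) (k n : Nat) (hk : k ≤ n) :
    (List.range n).countP (fun j => q j && decide (j < k)) = (List.range k).countP q := by
  induction n with
  | zero => interval_cases k; simp
  | succ n ih =>
    rcases Nat.lt_or_ge n k with h | h
    · have : k = n + 1 := by omega
      subst this
      apply List.countP_congr
      intro j hj
      simp only [List.mem_range] at hj
      simp [hj]
    · rw [List.range_succ, List.countP_append, ih h]
      have : ¬ (n < k) := by omega
      simp [this]

-- specification of A's inner while-loop (run over range M)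
theorem innerA_spec (cs : List Char) (c : Char) :
    ∀ (M : Nat) (st : Int × List (Option Int)), st.2.length = cs.length → M ≤ cs.length →
    ((List.range M).foldl (stepA cs c) st).1
        = st.1 + (((List.range M).countP (fun j => cs.getD j ' ' == c) : Nat) : Int) ∧
    ((List.range M).foldl (stepA cs c) st).2.length = st.2.length ∧
    (∀ k, k < M →
      ((List.range M).foldl (stepA cs c) st).2[k]? =
        (if cs.getD k ' ' = c then
          some (some (st.1 + 1 + (((List.range k).countP (fun j => cs.getD j ' ' == c) : Nat) : Int)))
        else st.2[k]?)) ∧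
    (∀ k, M ≤ k → ((List.range M).foldl (stepA cs c) st).2[k]? = st.2[k]?) := by
  intro M
  induction M with
  | zero =>
    intro st hlen _
    refine ⟨by simp, by simp, ?_, ?_⟩
    · intro k hk; omega
    · intro k _; simp
  | succ M ih =>
    intro st hlen hM
    obtain ⟨ih1, ih2, ih3, ih4⟩ := ih st hlen (by omega)
    simp only [List.range_succ, List.foldl_append, List.foldl_cons, List.foldl_nil]
    have hMlen : M < ((List.range M).foldl (stepA cs c) st).2.length := by omega
    by_cases hc : cs.getD M ' ' = c
    · have hbeq : (c == cs.getD M ' ') = true := by rw [beq_iff_eq]; exact hc.symm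
      have hbeq' : (cs.getD M ' ' == c) = true := by rw [beq_iff_eq]; exact hc
      have hcnt : (List.range M ++ [M]).countP (fun j => cs.getD j ' ' == c)
          = (List.range M).countP (fun j => cs.getD j ' ' == c) + 1 := by
        rw [List.countP_append]
        simp only [List.countP_cons, List.countP_nil, hbeq']
        simp
      refine ⟨?_, ?_, ?_, ?_⟩
      · simp only [stepA, hbeq, if_true]
        rw [hcnt, ih1]; push_cast; ring
      · simp only [stepA, hbeq, if_true]
        simp [ih2]
      · intro k hk
        rcases Nat.lt_or_ge k M with hkM | hkM
        · simp only [stepA, hbeq, if_true]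
          rw [List.getElem?_set_ne (by omega), ih3 k hkM]
        · have hkeq : k = M := by omega
          subst hkeq
          simp only [stepA, hbeq, if_true]
          have hval : (((List.range k).foldl (stepA cs c) st).2.set k
              (some (((List.range k).foldl (stepA cs c) st).1 + 1)))[k]?
              = some (some (((List.range k).foldl (stepA cs c) st).1 + 1)) := by
            rw [List.getElem?_set_self]; simp [hMlen]
          rw [hval, if_pos hc, ih1]
          have heq : st.1 + (((List.range k).countP (fun j => cs.getD j ' ' == c) : Nat) : Int) + 1
              = st.1 + 1 + (((List.range k).countP (fun j => cs.getD j ' ' == c) : Nat) : Int) := by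
            ring
          rw [heq]
      · intro k hk
        simp only [stepA, hbeq, if_true]
        rw [List.getElem?_set_ne (by omega), ih4 k (by omega)]
    · have hbeq : (c == cs.getD M ' ') = false := by
        rw [beq_eq_false_iff_ne]; exact fun h => hc h.symm
      have hbeq' : (cs.getD M ' ' == c) = false := by
        rw [beq_eq_false_iff_ne]; exact hc
      have hcnt : (List.range M ++ [M]).countP (fun j => cs.getD j ' ' == c)
          = (List.range M).countP (fun j => cs.getD j ' ' == c) := by
        rw [List.countP_append]
        simp only [List.countP_cons, List.countP_nil, hbeq']
        simp
      refine ⟨?_, ?_, ?_, ?_⟩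
      · simp only [stepA, hbeq, Bool.false_eq_true, if_false]
        rw [hcnt, ih1]
      · simp only [stepA, hbeq, Bool.false_eq_true, if_false]
        exact ih2
      · intro k hk
        simp only [stepA, hbeq, Bool.false_eq_true, if_false]
        rcases Nat.lt_or_ge k M with hkM | hkM
        · exact ih3 k hkM
        · have hkeq : k = M := by omega
          subst hkeq
          rw [ih4 k (by omega), if_neg hc]
      · intro k hk
        simp only [stepA, hbeq, Bool.false_eq_true, if_false]
        exact ih4 k (by omega)

-- the composed outer loop over the first m letters of the alphabet
theorem outer_inv (cs : List Char) :
    ∀ m, m ≤ 26 →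
    (((lsA.take m).foldl (fun st c => (List.range cs.length).foldl (stepA cs c) st)
        ((0 : Int), List.replicate cs.length (none : Option Int))).1
      = (((List.range cs.length).countP (fun k => inL m (cs.getD k ' ')) : Nat) : Int)) ∧
    (((lsA.take m).foldl (fun st c => (List.range cs.length).foldl (stepA cs c) st)
        ((0 : Int), List.replicate cs.length (none : Option Int))).2.length = cs.length) ∧
    (∀ k, k < cs.length →
      ((lsA.take m).foldl (fun st c => (List.range cs.length).foldl (stepA cs c) st)
        ((0 : Int), List.replicate cs.length (none : Option Int))).2[k]? =
        some (if inL m (cs.getD k ' ') then some ((lowRank cs k : Int) + 1) else none)) := by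
  intro m
  induction m with
  | zero =>
    intro _
    have h0 : ∀ d : Char, inL 0 d = false := by
      intro d
      apply Bool.eq_false_iff.mpr
      intro h
      simp only [inL, Bool.and_eq_true, decide_eq_true_eq] at h
      omega
    refine ⟨by simp [h0], by simp, ?_⟩
    intro k hk
    simp [h0, hk]
  | succ m ih =>
    intro hm1
    obtain ⟨ih1, ih2, ih3⟩ := ih (by omega)
    have hmlt : m < 26 := by omega
    have hctoNat : (lsA.getD m ' ').toNat = 97 + m := lsA_getD_toNat m hmlt
    have hmlen : m < lsA.length := by simp [lsA]; omega
    have htake : lsA.take (m + 1) = lsA.take m ++ [lsA.getD m ' '] := by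
      rw [List.take_add_one, List.getElem?_eq_getElem hmlen]
      simp [List.getD, List.getElem?_eq_getElem hmlen]
    rw [htake, List.foldl_append, List.foldl_cons, List.foldl_nil]
    obtain ⟨in1, in2, in3, in4⟩ :=
      innerA_spec cs (lsA.getD m ' ') cs.length
        ((lsA.take m).foldl (fun st c => (List.range cs.length).foldl (stepA cs c) st)
          ((0 : Int), List.replicate cs.length (none : Option Int))) ih2 le_rfl
    have hF1 : ∀ d : Char, inL (m + 1) d = (inL m d || (d == lsA.getD m ' ')) := by
      intro d
      rw [Bool.eq_iff_iff]
      simp only [inL, Bool.or_eq_true, Bool.and_eq_true, decide_eq_true_eq,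
        beq_iff_eq, char_eq_iff_toNat, hctoNat]
      omega
    have hdisj : ∀ j ∈ List.range cs.length,
        ¬(inL m (cs.getD j ' ') = true ∧ (cs.getD j ' ' == lsA.getD m ' ') = true) := by
      intro j _ ⟨h1, h2⟩
      simp only [inL, Bool.and_eq_true, decide_eq_true_eq] at h1
      rw [beq_iff_eq, char_eq_iff_toNat, hctoNat] at h2
      omega
    have hsplit : (List.range cs.length).countP (fun k => inL (m + 1) (cs.getD k ' '))
        = (List.range cs.length).countP (fun k => inL m (cs.getD k ' '))
          + (List.range cs.length).countP (fun j => cs.getD j ' ' == lsA.getD m ' ') := by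
      rw [List.countP_congr
        (q := fun j => inL m (cs.getD j ' ') || (cs.getD j ' ' == lsA.getD m ' '))
        (fun x _ => by simp only [hF1])]
      exact countP_or_disj _ _ _ hdisj
    refine ⟨?_, ?_, ?_⟩
    · rw [in1, ih1, hsplit]; push_cast; ring
    · rw [in2, ih2]
    · intro k hk
      rw [in3 k hk]
      by_cases hck : cs.getD k ' ' = lsA.getD m ' '
      · rw [if_pos hck]
        have hkt : (cs.getD k ' ').toNat = 97 + m :=
          ((char_eq_iff_toNat _ _).mp hck).trans hctoNat
        have hin : inL (m + 1) (cs.getD k ' ') = true := by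
          simp only [inL, Bool.and_eq_true, decide_eq_true_eq, hkt]
          omega
        rw [hin, if_pos rfl]
        -- identify B's rank predicate at this k
        have hpt : ∀ j : Nat,
            (isLow (cs.getD j ' ') &&
              (decide (cs.getD j ' ' < cs.getD k ' ') ||
                (cs.getD j ' ' == cs.getD k ' ' && decide (j < k))))
            = (inL m (cs.getD j ' ') || ((cs.getD j ' ' == lsA.getD m ' ') && decide (j < k))) := by
          intro j
          rw [Bool.eq_iff_iff]
          have ha : ('a' : Char).toNat = 97 := by decide
          have hz : ('z' : Char).toNat = 122 := by decide
          simp only [isLow, inL, Bool.and_eq_true, Bool.or_eq_true, decide_eq_true_eq,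
            beq_iff_eq, char_eq_iff_toNat, char_lt_iff_toNat, char_le_iff_toNat,
            hkt, hctoNat, ha, hz]
          omega
        have hdisj2 : ∀ j ∈ List.range cs.length,
            ¬(inL m (cs.getD j ' ') = true ∧
              ((cs.getD j ' ' == lsA.getD m ' ') && decide (j < k)) = true) := by
          intro j hj ⟨h1, h2⟩
          rw [Bool.and_eq_true] at h2
          exact hdisj j hj ⟨h1, h2.1⟩
        have hrank : lowRank cs k
            = (List.range cs.length).countP (fun j => inL m (cs.getD j ' '))
              + (List.range k).countP (fun j => cs.getD j ' ' == lsA.getD m ' ') := by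
          unfold lowRank
          rw [List.countP_congr
            (q := fun j => inL m (cs.getD j ' ') || ((cs.getD j ' ' == lsA.getD m ' ') && decide (j < k)))
            (fun x _ => by simp only [hpt])]
          rw [countP_or_disj _ _ _ hdisj2]
          rw [countP_range_lt (fun j => cs.getD j ' ' == lsA.getD m ' ') k cs.length (by omega)]
        have hval : ((lsA.take m).foldl (fun st c => (List.range cs.length).foldl (stepA cs c) st)
              ((0 : Int), List.replicate cs.length (none : Option Int))).1 + 1
              + (((List.range k).countP (fun j => cs.getD j ' ' == lsA.getD m ' ') : Nat) : Int)
            = ((lowRank cs k : Nat) : Int) + 1 := by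
          rw [hrank, ih1]; push_cast; ring
        rw [hval]
      · rw [if_neg hck]
        have hsame : inL (m + 1) (cs.getD k ' ') = inL m (cs.getD k ' ') := by
          rw [hF1]
          have hb : (cs.getD k ' ' == lsA.getD m ' ') = false := by
            rw [beq_eq_false_iff_ne]; exact hck
          rw [hb, Bool.or_false]
        rw [hsame]
        exact ih3 k hk

-- ===== VERDICT (by name: the statement is the Claim_ definition above) =====
theorem key_assign_spec : Claim_equal_key_assign := by
  intro key _
  unfold Spec_key_assign key_assign key_assign_alt
  set cs := key.toList with hcs
  have h := outer_inv cs 26 (by omega)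
  have hl : lsA.take 26 = lsA := by decide
  rw [hl] at h
  obtain ⟨_, hlen, hpt⟩ := h
  apply List.ext_getElem?
  intro k
  rcases Nat.lt_or_ge k cs.length with hk | hk
  · rw [hpt k hk]
    have h26 : inL 26 (cs.getD k ' ') = isLow (cs.getD k ' ') := by
      rw [Bool.eq_iff_iff]
      have ha : ('a' : Char).toNat = 97 := by decide
      have hz : ('z' : Char).toNat = 122 := by decide
      simp only [inL, isLow, Bool.and_eq_true, decide_eq_true_eq, char_le_iff_toNat, ha, hz]
      omega
    rw [h26, List.getElem?_map, List.getElem?_range hk]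
    rfl
  · have h1 : (lsA.foldl (fun st c => (List.range cs.length).foldl (stepA cs c) st)
        ((0 : Int), List.replicate cs.length (none : Option Int))).2[k]? = none := by
      rw [List.getElem?_eq_none]; rw [hlen]; exact hk
    have h2 : ((List.range cs.length).map (fun k =>
        if isLow (cs.getD k ' ') then some ((lowRank cs k : Int) + 1) else none))[k]? = none := by
      rw [List.getElem?_eq_none]; simp; omega
    rw [h1, h2]
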